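-- pv_equiv track=rewrite | github.com/HOboGoblin45/technic | technic_v4/ui/technic_app.py | _setup_tag_style
-- ===== SOURCE A (Python) =====
-- def _setup_tag_style(tag: str) -> str:
--     """
--     Return an inline CSS style for a given tag.
--     We use simple heuristics based on the tag text.
--     """
--     base = (
--         "display:inline-block; padding:2px 8px; margin:0 4px 4px 0; "
--         "border-radius:9999px; font-size:0.75rem; font-weight:500;"
--     )
--
--     text = tag.lower()
--
--     if any(k in text for k in ["breakout", "momentum"]):
--         # Bright blue
--         return base + "background-color:rgba(25,118,210,0.85); color:white;"
--     if any(k in text for k in ["trend", "bullish", "quality", "high conviction", "low risk"]):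
--         # Greenish
--         return base + "background-color:rgba(56,142,60,0.85); color:white;"
--     if any(k in text for k in ["high risk", "choppy", "fading", "high volatility"]):
--         # Orange/red warning
--         return base + "background-color:rgba(245,124,0,0.9); color:white;"
--     if any(k in text for k in ["quiet", "moderate", "neutral"]):
--         # Neutral gray
--         return base + "background-color:rgba(120,144,156,0.8); color:white;"
--
--     # Fallback pill
--     return base + "background-color:rgba(96,125,139,0.8); color:white;"
-- ===== SOURCE B (Python) =====
-- _BASE = (
--     "display:inline-block; padding:2px 8px; margin:0 4px 4px 0; "
--     "border-radius:9999px; font-size:0.75rem; font-weight:500;"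
-- )
--
-- # color table indexed by priority; index 4 is the fallback
-- _COLORS = [
--     "background-color:rgba(25,118,210,0.85); color:white;",
--     "background-color:rgba(56,142,60,0.85); color:white;",
--     "background-color:rgba(245,124,0,0.9); color:white;",
--     "background-color:rgba(120,144,156,0.8); color:white;",
--     "background-color:rgba(96,125,139,0.8); color:white;",
-- ]
--
-- # flat keyword -> priority map (lower number = higher priority)
-- _KEYWORD_RANK = {
--     "breakout": 0, "momentum": 0,
--     "trend": 1, "bullish": 1, "quality": 1, "high conviction": 1, "low risk": 1,
--     "high risk": 2, "choppy": 2, "fading": 2, "high volatility": 2,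
--     "quiet": 3, "moderate": 3, "neutral": 3,
-- }
--
--
-- def _setup_tag_style(tag: str) -> str:
--     text = tag.lower()
--     rank = min((r for kw, r in _KEYWORD_RANK.items() if kw in text), default=4)
--     return _BASE + _COLORS[rank]
-- ===== Notes on version B (the rewrite author's own statement) =====
-- stated objective: simpler
-- what changed: Instead of an ordered if-chain over keyword groups with early return, B uses a flat keyword->priority map, takes the minimum priority among all matching keywords (default 4), and indexes a color table with it.
import Mathlib
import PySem

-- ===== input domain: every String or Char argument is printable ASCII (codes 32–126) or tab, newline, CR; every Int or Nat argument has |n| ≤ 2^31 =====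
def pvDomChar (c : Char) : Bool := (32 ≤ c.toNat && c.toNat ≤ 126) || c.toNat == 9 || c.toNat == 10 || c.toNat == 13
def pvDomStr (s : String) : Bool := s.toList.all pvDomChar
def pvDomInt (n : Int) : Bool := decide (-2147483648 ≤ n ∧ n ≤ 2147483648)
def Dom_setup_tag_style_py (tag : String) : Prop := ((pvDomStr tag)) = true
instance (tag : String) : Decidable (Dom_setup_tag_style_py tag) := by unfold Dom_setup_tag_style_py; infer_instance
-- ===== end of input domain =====

-- B replaces A's ordered group if-chain (first matching group wins, early return) by a flat
-- keyword→priority map: take the minimum priority over all matching keywords and index a color table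
-- (objective: simpler; same result because the minimum matched priority is the first matching group).

-- ===== PORT A =====
def setup_tag_style_py (tag : String) : String :=
  let base := "display:inline-block; padding:2px 8px; margin:0 4px 4px 0; border-radius:9999px; font-size:0.75rem; font-weight:500;"
  let text := PySem.Str.lower tag
  if ["breakout", "momentum"].any (fun k => PySem.Str.isIn k text) then
    base ++ "background-color:rgba(25,118,210,0.85); color:white;"
  else if ["trend", "bullish", "quality", "high conviction", "low risk"].any (fun k => PySem.Str.isIn k text) then
    base ++ "background-color:rgba(56,142,60,0.85); color:white;"
  else if ["high risk", "choppy", "fading", "high volatility"].any (fun k => PySem.Str.isIn k text) then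
    base ++ "background-color:rgba(245,124,0,0.9); color:white;"
  else if ["quiet", "moderate", "neutral"].any (fun k => PySem.Str.isIn k text) then
    base ++ "background-color:rgba(120,144,156,0.8); color:white;"
  else
    base ++ "background-color:rgba(96,125,139,0.8); color:white;"

-- ===== PORT B =====
def pvBase : String :=
  "display:inline-block; padding:2px 8px; margin:0 4px 4px 0; border-radius:9999px; font-size:0.75rem; font-weight:500;"

def pvColors : List String :=
  [ "background-color:rgba(25,118,210,0.85); color:white;",
    "background-color:rgba(56,142,60,0.85); color:white;",
    "background-color:rgba(245,124,0,0.9); color:white;",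
    "background-color:rgba(120,144,156,0.8); color:white;",
    "background-color:rgba(96,125,139,0.8); color:white;" ]

def pvKeywordRank : List (String × Int) :=
  [ ("breakout", 0), ("momentum", 0),
    ("trend", 1), ("bullish", 1), ("quality", 1), ("high conviction", 1), ("low risk", 1),
    ("high risk", 2), ("choppy", 2), ("fading", 2), ("high volatility", 2),
    ("quiet", 3), ("moderate", 3), ("neutral", 3) ]

def setup_tag_style_py_alt (tag : String) : String :=
  let text := PySem.Str.lower tag
  -- the generator '(r for kw, r in _KEYWORD_RANK.items() if kw in text)' consumed by min(·, default=4)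
  let rank := PySem.List.minD
    (pvKeywordRank.filterMap (fun p => if PySem.Str.isIn p.1 text then some p.2 else none)) id 4
  -- _COLORS[rank]: rank ∈ [0,4] always, so pyGet? is some and the .getD "" default is never used
  pvBase ++ (PySem.List.pyGet? pvColors rank).getD ""

-- ===== PRECONDITION & SPEC =====
def Spec_setup_tag_style_py (tag : String) (out : String) : Prop := out = setup_tag_style_py_alt tag
instance (tag : String) (out : String) : Decidable (Spec_setup_tag_style_py tag out) := by unfold Spec_setup_tag_style_py; infer_instance

-- ===== CLAIM (what is proved, stated in full; the proofs are below) =====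
def Claim_equal_setup_tag_style_py : Prop := ∀ (tag : String), Dom_setup_tag_style_py tag → Spec_setup_tag_style_py tag (setup_tag_style_py tag)

-- ===== LEMMAS AND PROOFS =====

-- min? keeps a head that is already minimal (ties prefer the earlier element)
theorem pvMin?_cons_of_min : ∀ (xs : List Int) (x : Int), (∀ y ∈ xs, ¬ y < x) →
    PySem.List.min? (x :: xs) id = some x := by
  intro xs
  induction xs with
  | nil => intro x _; rfl
  | cons y ys ih =>
      intro x h
      have hy : ¬ y < x := h y (by simp)
      have ih' := ih x (fun z hz => h z (by simp [hz]))
      unfold PySem.List.min? at ih' ⊢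
      simp only [List.foldl_cons] at ih' ⊢
      show List.foldl _ (if y < x then (some y : Option Int) else some x) ys = some x
      rw [if_neg hy]
      exact ih' 

-- On a list whose ranks are nondecreasing, the minimum rank among the pairs passing the test
-- is the rank of the FIRST pair passing the test (A's first-group-wins rule).
theorem pvMinD_filterMap_eq_find? (c : String × Int → Bool) :
    ∀ (l : List (String × Int)), l.Pairwise (fun p q => p.2 ≤ q.2) →
      PySem.List.minD (l.filterMap (fun p => if c p then some p.2 else none)) id 4 =
      ((l.find? c).map (fun p => p.2)).getD 4 := by
  intro l
  induction l with
  | nil => intro _; rfl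
  | cons p l ih =>
      intro hpw
      rcases List.pairwise_cons.mp hpw with ⟨hp, hl⟩
      cases hc : c p with
      | false =>
          rw [List.find?_cons_of_neg (by simp [hc])]
          simpa [List.filterMap_cons, hc] using ih hl
      | true =>
          rw [List.find?_cons_of_pos hc]
          simp only [List.filterMap_cons, Option.map_some, Option.getD_some]
          rw [if_pos hc]
          unfold PySem.List.minD
          show (PySem.List.min? (p.2 :: List.filterMap (fun q => if c q then some q.2 else none) l) id).getD 4 = p.2
          rw [pvMin?_cons_of_min _ p.2 ?_, Option.getD_some]
          intro y hy
          rcases List.mem_filterMap.mp hy with ⟨q, hq, hqy⟩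
          have hy2 : y = q.2 := by
            by_cases h' : c q = true
            · simp [h'] at hqy; omega
            · simp [Bool.not_eq_true] at h'; simp [h'] at hqy
          have := hp q hq
          omega

-- instantiation at B's table: min matched rank = rank of the first matching keyword
theorem pvRank_eq (t : String) :
    PySem.List.minD
      (pvKeywordRank.filterMap (fun p => if PySem.Str.isIn p.1 t then some p.2 else none)) id 4 =
    ((pvKeywordRank.find? (fun p => PySem.Str.isIn p.1 t)).map (fun p => p.2)).getD 4 :=
  pvMinD_filterMap_eq_find? _ pvKeywordRank (by decide)

-- ===== VERDICT (by name: the statement is the Claim_ definition above) =====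
theorem setup_tag_style_py_spec : Claim_equal_setup_tag_style_py := by
  intro tag _
  unfold Spec_setup_tag_style_py setup_tag_style_py setup_tag_style_py_alt
  simp only [List.any_cons, List.any_nil, Bool.or_false]
  rw [pvRank_eq]
  simp only [pvKeywordRank, List.find?_cons, List.find?_nil]
  cases h1 : PySem.Str.isIn "breakout" (PySem.Str.lower tag) with
  | true => rfl
  | false =>
    cases h2 : PySem.Str.isIn "momentum" (PySem.Str.lower tag) with
    | true => rfl
    | false =>
      cases h3 : PySem.Str.isIn "trend" (PySem.Str.lower tag) with
      | true => rfl
      | false =>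
        cases h4 : PySem.Str.isIn "bullish" (PySem.Str.lower tag) with
        | true => rfl
        | false =>
          cases h5 : PySem.Str.isIn "quality" (PySem.Str.lower tag) with
          | true => rfl
          | false =>
            cases h6 : PySem.Str.isIn "high conviction" (PySem.Str.lower tag) with
            | true => rfl
            | false =>
              cases h7 : PySem.Str.isIn "low risk" (PySem.Str.lower tag) with
              | true => rfl
              | false =>
                cases h8 : PySem.Str.isIn "high risk" (PySem.Str.lower tag) with
                | true => rfl
                | false =>
                  cases h9 : PySem.Str.isIn "choppy" (PySem.Str.lower tag) with
                  | true => rfl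
                  | false =>
                    cases h10 : PySem.Str.isIn "fading" (PySem.Str.lower tag) with
                    | true => rfl
                    | false =>
                      cases h11 : PySem.Str.isIn "high volatility" (PySem.Str.lower tag) with
                      | true => rfl
                      | false =>
                        cases h12 : PySem.Str.isIn "quiet" (PySem.Str.lower tag) with
                        | true => rfl
                        | false =>
                          cases h13 : PySem.Str.isIn "moderate" (PySem.Str.lower tag) with
                          | true => rfl
                          | false =>
                            cases h14 : PySem.Str.isIn "neutral" (PySem.Str.lower tag) with
                            | true => rfl
                            | false => rfl
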